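-- pv_equiv track=rewrite | github.com/simonfqy/SimonfqyGitHub | lintcode/medium/621_maximum_subarray_v.py | maxSubarray5
-- ===== SOURCE A (Python) =====
-- from collections import deque
--
-- def maxSubarray5(nums, k1, k2):
--     if not nums or len(nums) < k1 or k2 < k1:
--         return 0
--     n = len(nums)
--     max_subarray_sum = float('-inf')
--     prefix_sum = 0
--     prefix_sum_list = [0]
--     queue = deque()
--     for right in range(1, n + 1):
--         prefix_sum += nums[right - 1]
--         if queue and queue[0] < right - k2:
--             queue.popleft()
--         if right >= k1:
--             # By design, if prefix_sum_list[right - k1] is smaller than all existing members in the queue (in terms of the members' corresponding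
--             # prefix sums), the whole queue will be popped and only contain (right - k1). This guarantees that queue[0] always corresponds to the
--             # minimum prefix sum among all the elements in the queue. And we really don't care about all the larger prefix sums in the queue that
--             # comes before right - k1, so popping them is appropriate.
--             # In turn, queue[1] corresponds to the second smallest prefix sum, queue[2] the 3rd, etc.
--             while queue and prefix_sum_list[queue[-1]] >= prefix_sum_list[right - k1]:
--                 queue.pop()
--             queue.append(right - k1)
--         if queue:
--             max_subarray_sum = max(max_subarray_sum, prefix_sum - prefix_sum_list[queue[0]])
--         prefix_sum_list.append(prefix_sum)
--
--     return max_subarray_sum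
-- ===== SOURCE B (Python) =====
-- def maxSubarray5(nums, k1, k2):
--     if not nums or len(nums) < k1 or k2 < k1:
--         return 0
--     P = [0]
--     for x in nums:
--         P.append(P[-1] + x)
--     return max(P[r] - min(P[max(0, r - k2):r - k1 + 1]) for r in range(k1, len(nums) + 1))
-- ===== Notes on version B (the rewrite author's own statement) =====
-- stated objective: simpler
-- what changed: Replaces the incremental monotonic-deque window-minimum machinery with a direct two-liner: build the prefix-sum array once, then take the max over each right end of P[r] minus the minimum of the explicit prefix-sum window slice.
import Mathlib
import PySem

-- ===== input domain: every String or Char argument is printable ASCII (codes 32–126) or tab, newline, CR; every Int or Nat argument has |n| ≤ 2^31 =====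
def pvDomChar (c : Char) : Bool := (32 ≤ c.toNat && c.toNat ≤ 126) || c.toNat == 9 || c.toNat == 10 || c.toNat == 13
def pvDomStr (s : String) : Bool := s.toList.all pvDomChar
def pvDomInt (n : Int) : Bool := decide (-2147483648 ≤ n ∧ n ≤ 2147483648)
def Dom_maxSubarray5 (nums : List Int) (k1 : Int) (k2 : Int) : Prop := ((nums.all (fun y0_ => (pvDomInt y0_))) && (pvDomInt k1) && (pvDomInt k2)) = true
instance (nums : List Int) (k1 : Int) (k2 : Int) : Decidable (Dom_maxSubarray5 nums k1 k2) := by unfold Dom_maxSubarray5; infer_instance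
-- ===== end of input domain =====

-- B replaces A's incremental monotonic-deque window minimum by a direct prefix-sum
-- array plus a per-right window slice minimum (objective: simpler; not faster).

-- ===== PORT A =====

-- xs[i] where the index is in range on every reachable call (comment per call site below)
def psGet (l : List Int) (i : Int) : Int := PySem.List.pyGetD l i 0

-- 'while queue and pred(queue[-1]): queue.pop()' = drop the maximal suffix satisfying pred
def dropBackWhile (p : Int → Bool) (q : List Int) : List Int := (q.reverse.dropWhile p).reverse

-- loop state: prefix_sum, prefix_sum_list, queue (head = left end), max_subarray_sum
-- (none encodes the float('-inf') initial value, which is never returned under Pre_)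
structure AState where
  ps : Int
  psl : List Int
  q : List Int
  mx : Option Int

def stepA (nums : List Int) (k1 : Int) (k2 : Int) (s : AState) (right : Int) : AState :=
  let ps' := s.ps + psGet nums (right - 1)       -- nums[right-1], 0 ≤ right-1 < len nums in the loop
  let q1 : List Int :=
    match s.q with
    | [] => []
    | j :: rest => if j < right - k2 then rest else j :: rest
  let q2 : List Int :=
    if k1 ≤ right then
      dropBackWhile (fun j => psGet s.psl (right - k1) ≤ psGet s.psl j) q1 ++ [right - k1]
    else q1
  let mx' : Option Int :=
    match q2 with
    | [] => s.mx
    | j :: _ =>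
        let v := ps' - psGet s.psl j
        some (match s.mx with | none => v | some m => max m v)
  ⟨ps', s.psl ++ [ps'], q2, mx'⟩

def maxSubarray5 (nums : List Int) (k1 : Int) (k2 : Int) : Int :=
  if nums = [] ∨ (nums.length : Int) < k1 ∨ k2 < k1 then 0
  else
    let fin := (PySem.List.pyRange 1 ((nums.length : Int) + 1) 1).foldl (stepA nums k1 k2) ⟨0, [0], [], none⟩
    match fin.mx with
    | some v => v
    | none => 0    -- float('-inf'); unreachable under Pre_

-- ===== PORT B =====

-- B's xs[i] (index in range on every reachable call)
def pyAt (l : List Int) (i : Int) : Int := PySem.List.pyGetD l i 0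

def maxSubarray5_alt (nums : List Int) (k1 : Int) (k2 : Int) : Int :=
  if nums = [] ∨ (nums.length : Int) < k1 ∨ k2 < k1 then 0
  else
    let P := nums.foldl (fun acc x => acc ++ [pyAt acc (-1) + x]) [0]   -- P.append(P[-1] + x)
    ((PySem.List.max?
        ((PySem.List.pyRange k1 ((nums.length : Int) + 1) 1).map (fun r =>
          pyAt P r -
            (PySem.List.min? (PySem.List.slice P (some (max 0 (r - k2))) (some (r - k1 + 1)))
              (fun x => x)).getD 0))
        (fun x => x)).getD 0)

-- ===== PRECONDITION & SPEC =====
-- Pre_ excludes exactly the inputs where A raises IndexError: a nonempty nums with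
-- k1 ≤ 0 and k1 ≤ k2 (prefix_sum_list[right - k1] is indexed past the end).
def Pre_maxSubarray5 (nums : List Int) (k1 : Int) (k2 : Int) : Prop :=
  nums = [] ∨ k2 < k1 ∨ 1 ≤ k1
instance (nums : List Int) (k1 : Int) (k2 : Int) : Decidable (Pre_maxSubarray5 nums k1 k2) := by
  unfold Pre_maxSubarray5; infer_instance

def pvWitness_maxSubarray5 : List Int × Int × Int := ([1, -2, 3], 1, 2)

def Spec_maxSubarray5 (nums : List Int) (k1 : Int) (k2 : Int) (out : Int) : Prop := out = maxSubarray5_alt nums k1 k2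
instance (nums : List Int) (k1 : Int) (k2 : Int) (out : Int) : Decidable (Spec_maxSubarray5 nums k1 k2 out) := by unfold Spec_maxSubarray5; infer_instance

-- ===== CLAIM (what is proved, stated in full; the proofs are below) =====
def Claim_equal_maxSubarray5 : Prop := ∀ (nums : List Int) (k1 : Int) (k2 : Int), Dom_maxSubarray5 nums k1 k2 → Pre_maxSubarray5 nums k1 k2 → Spec_maxSubarray5 nums k1 k2 (maxSubarray5 nums k1 k2)

-- ===== LEMMAS AND PROOFS =====

-- sum of the first j elements
def pref (nums : List Int) (j : ℕ) : Int := (nums.take j).sum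

-- pure model of A's loop
def runA (nums : List Int) (k1 : Int) (k2 : Int) : ℕ → AState
  | 0 => ⟨0, [0], [], none⟩
  | r + 1 => stepA nums k1 k2 (runA nums k1 k2 r) ((r : Int) + 1)

-- window of candidate left ends for right end r
def wlo (k2 : Int) (r : ℕ) : Int := max 0 ((r : Int) - k2)
def whi (k1 : Int) (r : ℕ) : Int := (r : Int) - k1
def wlist (nums : List Int) (k1 : Int) (k2 : Int) (r : ℕ) : List Int :=
  (PySem.List.pyRange (wlo k2 r) (whi k1 r + 1) 1).map (fun j => pref nums j.toNat)
def wmin (nums : List Int) (k1 : Int) (k2 : Int) (r : ℕ) : Int :=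
  (PySem.List.min? (wlist nums k1 k2 r) (fun x => x)).getD 0

def comb (acc : Option Int) (x : Int) : Option Int :=
  some (match acc with | none => x | some m => max m x)

-- model of max_subarray_sum after processing right ends 1..r
def mxM (nums : List Int) (k1 : Int) (k2 : Int) (r : ℕ) : Option Int :=
  ((PySem.List.pyRange k1 ((r : Int) + 1) 1).map
      (fun t => pref nums t.toNat - wmin nums k1 k2 t.toNat)).foldl comb none

-- queue invariant after processing right ends 1..r
def Qinv (nums : List Int) (k1 : Int) (k2 : Int) (r : ℕ) (q : List Int) : Prop :=
  if (r : Int) < k1 then q = []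
  else
    q.Pairwise (fun a b => a < b ∧ pref nums a.toNat < pref nums b.toNat)
    ∧ (∀ j ∈ q, wlo k2 r ≤ j ∧ j ≤ whi k1 r)
    ∧ (∀ i : Int, wlo k2 r ≤ i → i ≤ whi k1 r →
        ∃ j ∈ q, i ≤ j ∧ pref nums j.toNat ≤ pref nums i.toNat)

lemma psGet_map_range (f : ℕ → Int) (m : ℕ) (j : Int) (h0 : 0 ≤ j) (h1 : j < (m : Int)) :
    psGet ((List.range m).map f) j = f j.toNat := by
  unfold psGet
  rw [PySem.List.pyGetD_eq_getElem (h0 := h0)]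
  · simp [List.getElem_map, List.getElem_range]
  · simpa using h1

lemma pyAt_map_range (f : ℕ → Int) (m : ℕ) (j : Int) (h0 : 0 ≤ j) (h1 : j < (m : Int)) :
    pyAt ((List.range m).map f) j = f j.toNat := psGet_map_range f m j h0 h1

lemma pref_succ (nums : List Int) (r : ℕ) (h : r < nums.length) :
    pref nums (r + 1) = pref nums r + psGet nums (r : Int) := by
  unfold pref psGet
  rw [List.sum_take_succ nums r h]
  simp [List.getElem?_eq_getElem h]

lemma dropWhile_eq_filter_of_pairwise (p : Int → Bool) (l : List Int)
    (h : l.Pairwise (fun a b => p b = true → p a = true)) :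
    l.dropWhile p = l.filter (fun x => !p x) := by
  induction l with
  | nil => rfl
  | cons x xs ih =>
    rcases List.pairwise_cons.mp h with ⟨hx, hxs⟩
    by_cases hp : p x = true
    · simp [List.dropWhile, List.filter, hp, ih hxs]
    · simp only [Bool.not_eq_true] at hp
      simp only [List.dropWhile, List.filter, hp]
      simp only [Bool.not_false]
      rw [List.filter_eq_self.mpr]
      intro a ha
      simp only [Bool.not_eq_true']
      by_contra hc
      simp only [Bool.not_eq_false] at hc
      exact absurd (hx a ha hc) (by simp [hp])

lemma dropBackWhile_eq_filter (p : Int → Bool) (q : List Int)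
    (h : q.Pairwise (fun a b => p a = true → p b = true)) :
    dropBackWhile p q = q.filter (fun x => !p x) := by
  unfold dropBackWhile
  rw [dropWhile_eq_filter_of_pairwise p q.reverse (by rwa [List.pairwise_reverse])]
  rw [← List.filter_reverse, List.reverse_reverse]

-- head of a queue satisfying the invariant carries the window minimum
lemma head_wmin (nums : List Int) (k1 k2 : Int) (r : ℕ) (j : Int) (t : List Int)
    (hk : k1 ≤ (r : Int)) (_h1 : 1 ≤ k1)
    (hq : Qinv nums k1 k2 r (j :: t)) :
    pref nums j.toNat = wmin nums k1 k2 r := by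
  unfold Qinv at hq
  rw [if_neg (by omega)] at hq
  obtain ⟨hpw, hbd, hcov⟩ := hq
  obtain ⟨hjlo, hjhi⟩ := hbd j (List.mem_cons_self)
  have hmem : pref nums j.toNat ∈ wlist nums k1 k2 r := by
    unfold wlist
    exact List.mem_map_of_mem (PySem.List.mem_pyRange_one.mpr ⟨hjlo, by omega⟩)
  obtain ⟨m, hm⟩ : ∃ m, PySem.List.min? (wlist nums k1 k2 r) (fun x => x) = some m := by
    cases h : PySem.List.min? (wlist nums k1 k2 r) (fun x => x) with
    | none => exact absurd hmem (by rw [(PySem.List.min?_eq_none_iff _ (fun x => x)).mp h]; simp)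
    | some m => exact ⟨m, rfl⟩
  unfold wmin
  rw [hm, Option.getD_some]
  have hle : m ≤ pref nums j.toNat := PySem.List.min?_isMin hm _ hmem
  have hge : pref nums j.toNat ≤ m := by
    have hmm := PySem.List.min?_mem hm
    unfold wlist at hmm
    obtain ⟨i, hi, hieq⟩ := List.mem_map.mp hmm
    rw [PySem.List.mem_pyRange_one] at hi
    obtain ⟨j', hj', hij', hpj'⟩ := hcov i hi.1 (by omega)
    rw [hieq] at hpj'
    rcases List.mem_cons.mp hj' with h | h
    · exact h ▸ hpj'
    · have := (List.pairwise_cons.mp hpw).1 j' h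
      exact le_trans (le_of_lt this.2) hpj'
  omega

lemma foldl_eq_runA (nums : List Int) (k1 k2 : Int) (m : ℕ) :
    (PySem.List.pyRange 1 ((m : Int) + 1) 1).foldl (stepA nums k1 k2) ⟨0, [0], [], none⟩
      = runA nums k1 k2 m := by
  induction m with
  | zero => rw [show ((0:ℕ):Int) + 1 = 1 by norm_num, PySem.List.pyRange_one_eq_nil (le_refl 1)]; rfl
  | succ m ih =>
    rw [show (((m+1:ℕ)):Int) + 1 = ((m:Int) + 1) + 1 by push_cast; ring,
      PySem.List.pyRange_one_succ_right (by omega), List.foldl_append, ih]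
    rfl

lemma wlo_succ (k2 : Int) (r : ℕ) : wlo k2 (r + 1) = max 0 (((r : Int) + 1) - k2) := by
  unfold wlo; push_cast; ring_nf

lemma whi_succ (k1 : Int) (r : ℕ) : whi k1 (r + 1) = ((r : Int) + 1) - k1 := by
  unfold whi; push_cast; ring

lemma popStep (nums : List Int) (k1 k2 : Int) (_h1 : 1 ≤ k1) (r : ℕ) (q q1 : List Int)
    (hq1 : q1 = match q with
      | [] => ([] : List Int)
      | j :: rest => if j < ((r : Int) + 1) - k2 then rest else j :: rest)
    (hq : Qinv nums k1 k2 r q) :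
    q1.Pairwise (fun a b => a < b ∧ pref nums a.toNat < pref nums b.toNat)
    ∧ (∀ j ∈ q1, wlo k2 (r + 1) ≤ j ∧ j ≤ whi k1 r)
    ∧ (∀ i : Int, wlo k2 (r + 1) ≤ i → i ≤ whi k1 r →
        ∃ j ∈ q1, i ≤ j ∧ pref nums j.toNat ≤ pref nums i.toNat) := by
  unfold Qinv at hq
  by_cases hrk : (r : Int) < k1
  · rw [if_pos hrk] at hq
    subst hq
    simp only at hq1
    subst hq1
    refine ⟨List.Pairwise.nil, by simp, ?_⟩
    intro i hlo hhi
    exfalso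
    rw [wlo_succ] at hlo
    unfold whi at hhi
    omega
  · rw [if_neg hrk] at hq
    obtain ⟨hpw, hbd, hcov⟩ := hq
    have hlo_mono : wlo k2 r ≤ wlo k2 (r + 1) := by rw [wlo_succ]; unfold wlo; omega
    have hlo_step : wlo k2 (r + 1) ≤ wlo k2 r + 1 := by rw [wlo_succ]; unfold wlo; omega
    cases q with
    | nil =>
      subst hq1
      refine ⟨List.Pairwise.nil, by simp, ?_⟩
      intro i hlo hhi
      obtain ⟨j, hj, _⟩ := hcov i (le_trans hlo_mono hlo) hhi
      exact absurd hj (List.not_mem_nil)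
    | cons j0 t0 =>
      have hj0 := hbd j0 (List.mem_cons_self)
      have htail : ∀ j ∈ t0, j0 < j := fun j hj => ((List.pairwise_cons.mp hpw).1 j hj).1
      by_cases hpop : j0 < ((r : Int) + 1) - k2
      · simp only [if_pos hpop] at hq1
        subst hq1
        refine ⟨(List.pairwise_cons.mp hpw).2, ?_, ?_⟩
        · intro j hj
          refine ⟨?_, (hbd j (List.mem_cons_of_mem _ hj)).2⟩
          have h3 := htail j hj
          have h4 := hj0.1
          rw [wlo_succ]
          unfold wlo at h4
          omega
        · intro i hlo hhi
          obtain ⟨j, hj, hij, hpj⟩ := hcov i (le_trans hlo_mono hlo) hhi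
          rcases List.mem_cons.mp hj with rfl | hj'
          · exfalso
            rw [wlo_succ] at hlo
            omega
          · exact ⟨j, hj', hij, hpj⟩
      · simp only [if_neg hpop] at hq1
        subst hq1
        refine ⟨hpw, ?_, ?_⟩
        · intro j hj
          refine ⟨?_, (hbd j hj).2⟩
          rcases List.mem_cons.mp hj with rfl | hj'
          · have h4 := hj0.1
            rw [wlo_succ]
            unfold wlo at h4
            omega
          · have h3 := htail j hj'
            have h4 := (hbd j hj).1
            rw [wlo_succ]
            unfold wlo at h4
            omega
        · intro i hlo hhi
          exact hcov i (le_trans hlo_mono hlo) hhi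

lemma pushStep (nums : List Int) (k1 k2 : Int) (_h1 : 1 ≤ k1) (h2 : k1 ≤ k2) (r : ℕ)
    (hk : k1 ≤ (r : Int) + 1) (q1 : List Int)
    (hpw : q1.Pairwise (fun a b => a < b ∧ pref nums a.toNat < pref nums b.toNat))
    (hbd : ∀ j ∈ q1, wlo k2 (r + 1) ≤ j ∧ j ≤ whi k1 r)
    (hcov : ∀ i : Int, wlo k2 (r + 1) ≤ i → i ≤ whi k1 r →
        ∃ j ∈ q1, i ≤ j ∧ pref nums j.toNat ≤ pref nums i.toNat) :
    Qinv nums k1 k2 (r + 1)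
      (q1.filter (fun j => !decide (pref nums ((((r : Int) + 1) - k1).toNat) ≤ pref nums j.toNat))
        ++ [((r : Int) + 1) - k1]) := by
  set new : Int := ((r : Int) + 1) - k1 with hnew
  have hnew0 : 0 ≤ new := by omega
  have hnewhi : new = whi k1 (r + 1) := by rw [whi_succ]
  have hnewlo : wlo k2 (r + 1) ≤ new := by rw [wlo_succ]; omega
  unfold Qinv
  rw [if_neg (by push_cast; omega)]
  have hfil : ∀ j ∈ q1.filter (fun j => !decide (pref nums new.toNat ≤ pref nums j.toNat)),
      j ∈ q1 ∧ pref nums j.toNat < pref nums new.toNat := by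
    intro j hj
    refine ⟨List.mem_of_mem_filter hj, ?_⟩
    have := List.of_mem_filter hj
    simp only [Bool.not_eq_true', decide_eq_false_iff_not, not_le] at this
    exact this
  refine ⟨?_, ?_, ?_⟩
  · rw [List.pairwise_append]
    refine ⟨hpw.filter _, List.pairwise_singleton _ _, ?_⟩
    intro a ha b hb
    rw [List.mem_singleton] at hb
    subst hb
    obtain ⟨haq, hav⟩ := hfil a ha
    have := (hbd a haq).2
    unfold whi at this
    exact ⟨by omega, hav⟩
  · intro j hj
    rcases List.mem_append.mp hj with hj' | hj'
    · obtain ⟨haq, _⟩ := hfil j hj'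
      obtain ⟨hl, hh⟩ := hbd j haq
      refine ⟨hl, ?_⟩
      rw [← hnewhi]
      unfold whi at hh
      omega
    · rw [List.mem_singleton] at hj'
      subst hj'
      exact ⟨hnewlo, le_of_eq hnewhi⟩
  · intro i hlo hhi
    by_cases hpn : pref nums new.toNat ≤ pref nums i.toNat
    · refine ⟨new, List.mem_append_right _ (List.mem_singleton_self _), ?_, hpn⟩
      rw [hnewhi]; exact hhi
    · have hine : i ≠ new := fun h => hpn (by rw [h])
      have hle : i ≤ whi k1 r := by
        have h5 : i ≤ new := by rw [hnewhi]; exact hhi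
        unfold whi
        omega
      obtain ⟨j, hj, hij, hpj⟩ := hcov i hlo hle
      refine ⟨j, List.mem_append_left _ ?_, hij, hpj⟩
      rw [List.mem_filter]
      refine ⟨hj, ?_⟩
      simp only [Bool.not_eq_true', decide_eq_false_iff_not, not_le]
      exact lt_of_le_of_lt hpj (not_le.mp hpn)


theorem invA (nums : List Int) (k1 k2 : Int) (h1 : 1 ≤ k1) (h2 : k1 ≤ k2) :
    ∀ r : ℕ, r ≤ nums.length →
      (runA nums k1 k2 r).ps = pref nums r
      ∧ (runA nums k1 k2 r).psl = (List.range (r + 1)).map (pref nums)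
      ∧ Qinv nums k1 k2 r (runA nums k1 k2 r).q
      ∧ (runA nums k1 k2 r).mx = mxM nums k1 k2 r := by
  intro r
  induction r with
  | zero =>
    intro _
    refine ⟨by simp [runA, pref], ?_, ?_, ?_⟩
    · simp [runA, List.range_succ, pref]
    · unfold Qinv
      rw [if_pos (by push_cast; omega)]
      rfl
    · unfold mxM runA
      rw [PySem.List.pyRange_one_eq_nil (by push_cast; omega)]
      rfl
  | succ r ih =>
    intro hrn
    obtain ⟨hps, hpsl, hq, hmx⟩ := ih (by omega)
    have hrun : runA nums k1 k2 (r + 1) = stepA nums k1 k2 (runA nums k1 k2 r) ((r : Int) + 1) := rfl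
    set s := runA nums k1 k2 r with hsdef
    have hps' : s.ps + psGet nums (((r : Int) + 1) - 1) = pref nums (r + 1) := by
      rw [show ((r : Int) + 1) - 1 = (r : Int) by ring, hps, pref_succ nums r (by omega)]
    by_cases hcase : ((r : Int) + 1) < k1
    · have hq0 : s.q = [] := by unfold Qinv at hq; rwa [if_pos (by omega)] at hq
      have hstep : stepA nums k1 k2 s ((r : Int) + 1)
          = ⟨pref nums (r + 1), s.psl ++ [pref nums (r + 1)], [], s.mx⟩ := by
        simp only [stepA, hq0, if_neg (not_le.mpr hcase), hps']
      rw [hrun, hstep]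
      refine ⟨rfl, by rw [hpsl]; simp [List.range_succ], ?_, ?_⟩
      · unfold Qinv
        rw [if_pos (by push_cast; omega)]
      · show s.mx = _
        rw [hmx]
        unfold mxM
        rw [PySem.List.pyRange_one_eq_nil (by omega), PySem.List.pyRange_one_eq_nil (by push_cast; omega)]
    · rw [not_lt] at hcase
      set q1 : List Int := (match s.q with
        | [] => []
        | j :: rest => if j < ((r : Int) + 1) - k2 then rest else j :: rest) with hq1def
      obtain ⟨hpw1, hbd1, hcov1⟩ := popStep nums k1 k2 h1 r s.q q1 hq1def hq
      have hget : ∀ j : Int, 0 ≤ j → j < ((r : Int) + 1) → psGet s.psl j = pref nums j.toNat := by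
        intro j hj0 hj1
        rw [hpsl]
        exact psGet_map_range (pref nums) (r + 1) j hj0 (by push_cast; omega)
      have hnew0 : (0 : Int) ≤ ((r : Int) + 1) - k1 := by omega
      have hnewlt : ((r : Int) + 1) - k1 < ((r : Int) + 1) := by omega
      have hbd1' : ∀ x ∈ q1, 0 ≤ x ∧ x < ((r : Int) + 1) := by
        intro x hx
        obtain ⟨hl, hh⟩ := hbd1 x hx
        unfold whi at hh
        refine ⟨le_trans (le_max_left 0 _) hl, by omega⟩
      have hdrop : dropBackWhile
            (fun j => decide (psGet s.psl (((r : Int) + 1) - k1) ≤ psGet s.psl j)) q1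
          = q1.filter (fun j => !decide (pref nums ((((r : Int) + 1) - k1).toNat) ≤ pref nums j.toNat)) := by
        rw [dropBackWhile_eq_filter _ _ (List.Pairwise.imp_of_mem (fun {a b} ha hb hab => ?_) hpw1)]
        · apply List.filter_congr
          intro x hx
          obtain ⟨hx0, hx1⟩ := hbd1' x hx
          rw [hget _ hnew0 hnewlt, hget _ hx0 hx1]
        · obtain ⟨ha0, ha1⟩ := hbd1' a ha
          obtain ⟨hb0, hb1⟩ := hbd1' b hb
          rw [hget _ hnew0 hnewlt, hget _ ha0 ha1] at *
          rw [hget _ hb0 hb1]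
          intro hdec
          simp only [decide_eq_true_eq] at *
          exact le_trans hdec (le_of_lt hab.2)
      have hQ2 : Qinv nums k1 k2 (r + 1)
          (q1.filter (fun j => !decide (pref nums ((((r : Int) + 1) - k1).toNat) ≤ pref nums j.toNat))
            ++ [((r : Int) + 1) - k1]) := pushStep nums k1 k2 h1 h2 r hcase q1 hpw1 hbd1 hcov1
      rcases hsplit : (q1.filter (fun j => !decide (pref nums ((((r : Int) + 1) - k1).toNat) ≤ pref nums j.toNat))
            ++ [((r : Int) + 1) - k1]) with _ | ⟨hd, tl⟩
      · exact absurd hsplit (by simp)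
      · rw [hsplit] at hQ2
        have hstep : stepA nums k1 k2 s ((r : Int) + 1)
            = ⟨pref nums (r + 1), s.psl ++ [pref nums (r + 1)], hd :: tl,
                some (match s.mx with
                  | none => pref nums (r + 1) - psGet s.psl hd
                  | some m => max m (pref nums (r + 1) - psGet s.psl hd))⟩ := by
          simp only [stepA, ← hq1def, if_pos hcase, hdrop, hsplit, hps']
        rw [hrun, hstep]
        have hQ2' := hQ2
        unfold Qinv at hQ2'
        rw [if_neg (by push_cast; omega)] at hQ2'
        obtain ⟨-, hbd2, -⟩ := hQ2'
        obtain ⟨hdl, hdh⟩ := hbd2 hd (List.mem_cons_self)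
        have hd0 : 0 ≤ hd := le_trans (le_max_left 0 _) hdl
        have hd1 : hd < ((r : Int) + 1) := by
          rw [whi_succ] at hdh
          omega
        have hhd : psGet s.psl hd = wmin nums k1 k2 (r + 1) := by
          rw [hget hd hd0 hd1]
          exact head_wmin nums k1 k2 (r + 1) hd tl (by push_cast; omega) h1 hQ2
        have hmxstep : mxM nums k1 k2 (r + 1)
            = comb (mxM nums k1 k2 r) (pref nums (r + 1) - wmin nums k1 k2 (r + 1)) := by
          unfold mxM
          rw [show ((↑(r + 1) : Int) + 1) = ((r : Int) + 1) + 1 by push_cast; ring,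
            PySem.List.pyRange_one_succ_right hcase, List.map_append, List.foldl_append]
          simp only [List.map_cons, List.map_nil, List.foldl_cons, List.foldl_nil]
          rw [show ((r : Int) + 1).toNat = r + 1 by omega]
        refine ⟨rfl, by rw [hpsl]; simp [List.range_succ], hQ2, ?_⟩
        show some _ = _
        rw [hhd, hmx, hmxstep]
        rfl

lemma foldl_comb_some (t : List Int) (x : Int) :
    t.foldl comb (some x) = some (t.foldl max x) := by
  induction t generalizing x with
  | nil => rfl
  | cons y t ih => simp only [List.foldl_cons, comb]; exact ih (max x y)

lemma max?_eq_foldl_comb (l : List Int) :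
    PySem.List.max? l (fun x => x) = l.foldl comb none := by
  cases l with
  | nil => rfl
  | cons x t =>
    rw [PySem.List.max?_id_cons, List.foldl_cons, show comb none x = some x from rfl,
      foldl_comb_some]

lemma PL_spec (nums : List Int) :
    nums.foldl (fun acc x => acc ++ [pyAt acc (-1) + x]) [0]
      = (List.range (nums.length + 1)).map (pref nums) := by
  have aux : ∀ (l pre : List Int),
      l.foldl (fun acc x => acc ++ [pyAt acc (-1) + x]) ((List.range (pre.length + 1)).map (pref pre))
        = (List.range ((pre ++ l).length + 1)).map (pref (pre ++ l)) := by
    intro l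
    induction l with
    | nil => intro pre; simp
    | cons x xs ih =>
      intro pre
      rw [List.foldl_cons]
      have hacc : (List.range (pre.length + 1)).map (pref pre)
          = (List.range pre.length).map (pref pre) ++ [pref pre pre.length] := by
        rw [List.range_succ, List.map_append]; rfl
      have hlast : pyAt ((List.range (pre.length + 1)).map (pref pre)) (-1) = pref pre pre.length := by
        rw [hacc]; exact PySem.List.pyGetD_neg_one_append_singleton _ _ _
      have hstep : (List.range (pre.length + 1)).map (pref pre)
            ++ [pyAt ((List.range (pre.length + 1)).map (pref pre)) (-1) + x]
          = (List.range ((pre ++ [x]).length + 1)).map (pref (pre ++ [x])) := by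
        rw [hlast]
        have h1 : (List.range (pre.length + 1)).map (pref pre)
            = (List.range (pre.length + 1)).map (pref (pre ++ [x])) := by
          apply List.map_congr_left
          intro j hj
          rw [List.mem_range] at hj
          unfold pref
          rw [List.take_append_of_le_length (by omega)]
        have h2 : pref pre pre.length + x = pref (pre ++ [x]) (pre.length + 1) := by
          unfold pref
          rw [List.take_of_length_le (by simp), List.take_of_length_le (by simp)]
          simp
        rw [h1, h2, show (pre ++ [x]).length + 1 = (pre.length + 1) + 1 by simp,
          List.range_succ, List.map_append]
        simp [List.range_succ]
      rw [hstep, ih (pre ++ [x])]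
      simp
  have h0 : ([0] : List Int) = (List.range (0 + 1)).map (pref ([] : List Int)) := rfl
  have := aux nums []
  simp only [List.length_nil] at this
  rw [h0, this]
  simp

lemma slice_PL (nums : List Int) (k1 k2 : Int) (r : ℕ) (h1 : 1 ≤ k1) (h2 : k1 ≤ k2)
    (hk : k1 ≤ (r : Int)) (hr : r ≤ nums.length) :
    PySem.List.slice ((List.range (nums.length + 1)).map (pref nums))
        (some (wlo k2 r)) (some (whi k1 r + 1))
      = wlist nums k1 k2 r := by
  have hlo0 : 0 ≤ wlo k2 r := le_max_left 0 _
  have hhi0 : 0 ≤ whi k1 r + 1 := by unfold whi; omega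
  have hlohi : wlo k2 r ≤ whi k1 r + 1 := by unfold wlo whi; omega
  have hhir : whi k1 r + 1 ≤ (r : Int) := by unfold whi; omega
  rw [PySem.List.slice_toNat (ha := hlo0) (hb := hhi0)]
  unfold wlist
  rw [PySem.List.pyRange_one, List.map_map]
  apply List.ext_getElem
  · simp only [List.length_take, List.length_drop, List.length_map, List.length_range]
    omega
  · intro i hi1 hi2
    simp only [List.length_take, List.length_drop, List.length_map, List.length_range] at hi1
    simp only [List.getElem_take, List.getElem_drop, List.getElem_map, List.getElem_range,
      Function.comp_apply]
    congr 1
    omega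

-- ===== VERDICT (by name: the statement is the Claim_ definition above) =====
theorem maxSubarray5_spec : Claim_equal_maxSubarray5 := by
  intro nums k1 k2 _ hpre
  unfold Spec_maxSubarray5 maxSubarray5 maxSubarray5_alt
  by_cases hg : nums = [] ∨ (nums.length : Int) < k1 ∨ k2 < k1
  · rw [if_pos hg, if_pos hg]
  · rw [if_neg hg, if_neg hg]
    rw [not_or, not_or, not_lt, not_lt] at hg
    obtain ⟨hne, hlen, hk21⟩ := hg
    have h1 : 1 ≤ k1 := by
      rcases hpre with h | h | h
      · exact absurd h hne
      · omega
      · exact h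
    have hA := (invA nums k1 k2 h1 hk21 nums.length (le_refl _)).2.2.2
    simp only [foldl_eq_runA, PL_spec]
    rw [hA]
    have hmap : (PySem.List.pyRange k1 ((nums.length : Int) + 1) 1).map (fun r =>
          pyAt ((List.range (nums.length + 1)).map (pref nums)) r -
            (PySem.List.min? (PySem.List.slice ((List.range (nums.length + 1)).map (pref nums))
                (some (max 0 (r - k2))) (some (r - k1 + 1))) (fun x => x)).getD 0)
        = (PySem.List.pyRange k1 ((nums.length : Int) + 1) 1).map (fun t =>
            pref nums t.toNat - wmin nums k1 k2 t.toNat) := by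
      apply List.map_congr_left
      intro x hx
      rw [PySem.List.mem_pyRange_one] at hx
      have hx0 : 0 ≤ x := by omega
      have hxt : x = ((x.toNat : ℕ) : Int) := (Int.toNat_of_nonneg hx0).symm
      rw [pyAt_map_range (pref nums) (nums.length + 1) x hx0 (by push_cast; omega)]
      rw [show max 0 (x - k2) = wlo k2 x.toNat by unfold wlo; rw [← hxt],
        show x - k1 + 1 = whi k1 x.toNat + 1 by unfold whi; rw [← hxt],
        slice_PL nums k1 k2 x.toNat h1 hk21 (by omega) (by omega)]
      rfl
    rw [hmap, max?_eq_foldl_comb]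
    show (match mxM nums k1 k2 nums.length with | some v => v | none => 0)
        = (mxM nums k1 k2 nums.length).getD 0
    cases mxM nums k1 k2 nums.length <;> rfl
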